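-- pv_equiv track=rewrite | github.com/DarkGermanGamer/FreeCodeCamp-Projects | Coding Challenges/DailyChallenge/Python/20260121_MarkdownInlineCodeParser.py | parse_inline_code
-- ===== SOURCE A (Python) =====
-- def parse_inline_code(markdown):
--     tick_on = False
--     new_string = ''
--
--     for char in markdown:
--         if char == '`':
--             new_string += f'<{"/" if tick_on else ""}code>'
--             tick_on = not tick_on
--         else:
--             new_string += char
--
--     return new_string
-- ===== SOURCE B (Python) =====
-- def parse_inline_code(markdown):
--     parts = markdown.split('`')
--     pieces = [parts[0]]
--     for i, seg in enumerate(parts[1:], 1):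
--         pieces.append('<code>' if i % 2 == 1 else '</code>')
--         pieces.append(seg)
--     return ''.join(pieces)
-- ===== Notes on version B (the rewrite author's own statement) =====
-- stated objective: idiomatic
-- what changed: B replaces A's per-character loop with a tick_on toggle flag and repeated string concatenation by a single str.split on the backtick character followed by one join of the segments with alternating code/close-code tags chosen by segment parity.
import Mathlib
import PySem

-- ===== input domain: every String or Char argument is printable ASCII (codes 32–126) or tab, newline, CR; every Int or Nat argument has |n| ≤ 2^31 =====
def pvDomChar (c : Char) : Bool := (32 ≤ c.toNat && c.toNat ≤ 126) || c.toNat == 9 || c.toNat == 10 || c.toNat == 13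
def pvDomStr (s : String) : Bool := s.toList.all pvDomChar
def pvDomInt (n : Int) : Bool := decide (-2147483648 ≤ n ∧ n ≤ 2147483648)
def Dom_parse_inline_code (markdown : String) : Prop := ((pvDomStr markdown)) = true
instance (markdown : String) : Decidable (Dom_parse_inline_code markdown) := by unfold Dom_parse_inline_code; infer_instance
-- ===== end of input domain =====

-- B splits the string on backticks once and joins the segments with alternating <code>/</code> tags,
-- instead of A's per-character loop with a toggle flag and repeated concatenation; more idiomatic, and the
-- timing run measured it faster by a constant factor.


-- ===== PORT A =====
-- char-by-char loop with a toggle flag; the f-string '<{"/" if tick_on else ""}code>' is built piecewise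
def parse_inline_code (markdown : String) : String :=
  String.mk ((markdown.toList.foldl
    (fun (st : Bool × List Char) c =>
      if c = '`' then
        (!st.1, st.2 ++ ('<' :: ((if st.1 then ['/'] else []) ++ "code>".toList)))
      else (st.1, st.2 ++ [c]))
    (false, [])).2)

-- ===== PORT B =====
-- parts = markdown.split('`'); pieces built from parts[0] and enumerate(parts[1:], 1); ''.join(pieces)
def parse_inline_code_alt (markdown : String) : String :=
  let parts := PySem.Chars.splitOn markdown.toList ['`']
  let pieces := (PySem.List.enumerate (parts.drop 1) 1).foldl
    (fun acc p =>
      acc ++ [(if PySem.Int.mod p.1 2 == 1 then "<code>".toList else "</code>".toList), p.2])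
    [parts.headD []]
  String.mk pieces.flatten

-- ===== PRECONDITION & SPEC =====
def Spec_parse_inline_code (markdown : String) (out : String) : Prop := out = parse_inline_code_alt markdown
instance (markdown : String) (out : String) : Decidable (Spec_parse_inline_code markdown out) := by unfold Spec_parse_inline_code; infer_instance

-- ===== CLAIM (what is proved, stated in full; the proofs are below) =====
def Claim_equal_parse_inline_code : Prop := ∀ (markdown : String), Dom_parse_inline_code markdown → Spec_parse_inline_code markdown (parse_inline_code markdown)

-- ===== LEMMAS AND PROOFS =====

-- simple structural characterisation of splitting on a single backtick
def pvSp : List Char → List (List Char)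
  | [] => [[]]
  | c :: cs => if c = '`' then [] :: pvSp cs else (pvSp cs).modifyHead (c :: ·)

theorem pvSp_ne_nil (cs : List Char) : pvSp cs ≠ [] := by
  induction cs with
  | nil => simp [pvSp]
  | cons c cs ih =>
    simp only [pvSp]
    split
    · simp
    · cases h : pvSp cs with
      | nil => exact absurd h ih
      | cons a t => simp

theorem pvGo_eq (fuel : Nat) : ∀ (l cur : List Char) (accs : List (List Char)),
    l.length ≤ fuel →
    PySem.Chars.splitOn.go ['`'] fuel l cur accs.reverse =
      accs ++ (pvSp l).modifyHead (cur.reverse ++ ·) := by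
  induction fuel with
  | zero =>
    intro l cur accs hl
    have : l = [] := by cases l <;> simp_all
    subst this
    simp [PySem.Chars.splitOn.go, pvSp]
  | succ fuel ih =>
    intro l cur accs hl
    cases l with
    | nil => simp [PySem.Chars.splitOn.go, pvSp]
    | cons c rest =>
      by_cases hc : c = '`'
      · subst hc
        have harm : PySem.Chars.splitOn.go ['`'] (fuel + 1) ('`' :: rest) cur accs.reverse
            = PySem.Chars.splitOn.go ['`'] fuel rest [] (cur.reverse :: accs.reverse) := by
          rw [PySem.Chars.splitOn.go.eq_3,
            if_pos (by simp [List.isPrefixOf_iff_prefix, List.cons_prefix_cons])]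
          simp only [List.length_cons, List.length_nil, List.drop_succ_cons, List.drop_zero]
        rw [harm]
        have : (cur.reverse :: accs.reverse) = (accs ++ [cur.reverse]).reverse := by simp
        rw [this, ih rest [] (accs ++ [cur.reverse]) (by simpa using Nat.le_of_succ_le_succ hl)]
        cases h : pvSp rest with
        | nil => exact absurd h (pvSp_ne_nil rest)
        | cons a t => simp [pvSp, h]
      · have harm : PySem.Chars.splitOn.go ['`'] (fuel + 1) (c :: rest) cur accs.reverse
            = PySem.Chars.splitOn.go ['`'] fuel rest (c :: cur) accs.reverse := by
          rw [PySem.Chars.splitOn.go.eq_3,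
            if_neg (by
              simp [List.isPrefixOf_iff_prefix, List.cons_prefix_cons]
              exact fun h => hc h.symm)]
        rw [harm, ih rest (c :: cur) accs (by simpa using Nat.le_of_succ_le_succ hl)]
        cases h : pvSp rest with
        | nil => exact absurd h (pvSp_ne_nil rest)
        | cons a t => simp [pvSp, h, hc]

theorem pvSplitOn_eq (cs : List Char) : PySem.Chars.splitOn cs ['`'] = pvSp cs := by
  have h := pvGo_eq (cs.length + 1) cs [] [] (by simp)
  simp only [List.reverse_nil, List.nil_append] at h
  rw [PySem.Chars.splitOn, h]
  cases h' : pvSp cs with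
  | nil => exact absurd h' (pvSp_ne_nil cs)
  | cons a t => simp

-- alternating-tags rendering of the tail segments, boolean version (A's view)
def pvRender : Bool → List (List Char) → List Char
  | _, [] => []
  | t, p :: ps =>
      ('<' :: ((if t then ['/'] else []) ++ "code>".toList)) ++ p ++ pvRender (!t) ps

def pvCombine (t : Bool) : List (List Char) → List Char
  | [] => []
  | h :: ps => h ++ pvRender t ps

theorem pvA_loop (cs : List Char) : ∀ (tick : Bool) (acc : List Char),
    (cs.foldl
      (fun (st : Bool × List Char) c =>
        if c = '`' then
          (!st.1, st.2 ++ ('<' :: ((if st.1 then ['/'] else []) ++ "code>".toList)))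
        else (st.1, st.2 ++ [c]))
      (tick, acc)).2 = acc ++ pvCombine tick (pvSp cs) := by
  induction cs with
  | nil => intro tick acc; simp [pvSp, pvCombine, pvRender]
  | cons c cs ih =>
    intro tick acc
    by_cases hc : c = '`'
    · subst hc
      simp only [List.foldl_cons, ih, pvSp, if_pos rfl]
      cases h : pvSp cs with
      | nil => exact absurd h (pvSp_ne_nil cs)
      | cons a t => simp [pvCombine, pvRender, h]
    · simp only [List.foldl_cons, ih, pvSp, if_neg hc]
      cases h : pvSp cs with
      | nil => exact absurd h (pvSp_ne_nil cs)
      | cons a t => simp [pvCombine, h]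

-- integer-indexed rendering (B's view)
def pvRenderN : Int → List (List Char) → List Char
  | _, [] => []
  | i, p :: ps =>
      (if PySem.Int.mod i 2 == 1 then "<code>".toList else "</code>".toList) ++ p ++ pvRenderN (i + 1) ps

theorem pvB_loop (ps : List (List Char)) : ∀ (i : Int) (acc : List (List Char)),
    ((PySem.List.enumerate ps i).foldl
      (fun acc p =>
        acc ++ [(if PySem.Int.mod p.1 2 == 1 then "<code>".toList else "</code>".toList), p.2])
      acc).flatten = acc.flatten ++ pvRenderN i ps := by
  induction ps with
  | nil => intro i acc; simp [PySem.List.enumerate, pvRenderN]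
  | cons p ps ih =>
    intro i acc
    simp only [PySem.List.enumerate, List.foldl_cons, ih, pvRenderN]
    simp

theorem pvRenderN_eq (ps : List (List Char)) : ∀ (i : Int), 0 ≤ i →
    pvRenderN i ps = pvRender (PySem.Int.mod i 2 == 0) ps := by
  induction ps with
  | nil => intro i _; simp [pvRenderN, pvRender]
  | cons p ps ih =>
    intro i hi
    have hm : PySem.Int.mod i 2 = i % 2 := by
      simp [PySem.Int.mod, Int.fmod_eq_emod]
    have hm1 : PySem.Int.mod (i + 1) 2 = (i + 1) % 2 := by
      simp [PySem.Int.mod, Int.fmod_eq_emod]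
    have h01 : i % 2 = 0 ∨ i % 2 = 1 := by omega
    simp only [pvRenderN, pvRender, ih (i + 1) (by omega), hm, hm1]
    rcases h01 with h | h
    · have : (i + 1) % 2 = 1 := by omega
      simp [h, this]
    · have : (i + 1) % 2 = 0 := by omega
      simp [h, this]

-- ===== VERDICT (by name: the statement is the Claim_ definition above) =====
theorem parse_inline_code_spec : Claim_equal_parse_inline_code := by
  intro markdown _
  unfold Spec_parse_inline_code parse_inline_code parse_inline_code_alt
  simp only [pvSplitOn_eq, pvA_loop]
  have h1 : (PySem.Int.mod 1 2 == 0) = false := by decide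
  cases h : pvSp markdown.toList with
  | nil => exact absurd h (pvSp_ne_nil markdown.toList)
  | cons a t =>
    simp only [List.drop_one, List.tail_cons, List.headD_cons]
    rw [pvB_loop t 1 [a], pvRenderN_eq t 1 (by omega), h1]
    simp [pvCombine]
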